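-- pv_equiv track=rewrite | github.com/daniel-reich/ubiquitous-fiesta | WsGjnhMdjsvzyuk5q_12.py | dashed
-- ===== SOURCE A (Python) =====
-- def dashed(txt):
--   temp = ""
--   vowel = "aeiouAEIOU"
--   for i in txt:
--     if i in vowel:
--       temp += "-{}-".format(i)
--     else:
--       temp += i
--   return temp
-- ===== SOURCE B (Python) =====
-- import re
--
-- def dashed(txt):
--   return re.sub(r'[aeiouAEIOU]', lambda m: '-' + m.group() + '-', txt)
-- ===== Notes on version B (the rewrite author's own statement) =====
-- stated objective: idiomatic
-- what changed: Replaces the manual character loop with string accumulation by a single regex substitution that wraps each vowel in dashes.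
import Mathlib
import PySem

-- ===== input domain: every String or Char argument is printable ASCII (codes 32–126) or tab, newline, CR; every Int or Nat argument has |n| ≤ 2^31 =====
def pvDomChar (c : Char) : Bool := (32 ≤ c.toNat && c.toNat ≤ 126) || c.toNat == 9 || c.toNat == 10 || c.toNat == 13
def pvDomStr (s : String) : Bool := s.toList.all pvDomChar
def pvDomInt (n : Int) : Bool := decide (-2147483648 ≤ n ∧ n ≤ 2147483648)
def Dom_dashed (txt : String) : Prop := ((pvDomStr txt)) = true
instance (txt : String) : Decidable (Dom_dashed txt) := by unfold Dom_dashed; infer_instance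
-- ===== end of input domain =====

-- B replaces A's manual accumulation loop by a single regex substitution (per-vowel dash wrapping); idiomatic.


-- ===== PORT A =====
-- the loop `for i in txt: temp += …` with accumulator temp
def dashedGo : List Char → String → String
  | [], temp => temp
  | c :: rest, temp =>
      dashedGo rest (temp ++ (if ("aeiouAEIOU".toList.contains c) then "-" ++ String.singleton c ++ "-" else String.singleton c))

def dashed (txt : String) : String := dashedGo txt.toList ""

-- ===== PORT B =====
-- re.sub with a single-character class [aeiouAEIOU] is exactly a per-character replacement:
-- each vowel becomes '-' + c + '-', every other character is copied; ported as a flatMap.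
def dashed_alt (txt : String) : String :=
  String.ofList (txt.toList.flatMap (fun c => if ("aeiouAEIOU".toList.contains c) then ['-', c, '-'] else [c]))

-- ===== PRECONDITION & SPEC =====
def Spec_dashed (txt : String) (out : String) : Prop := out = dashed_alt txt
instance (txt : String) (out : String) : Decidable (Spec_dashed txt out) := by unfold Spec_dashed; infer_instance

-- ===== CLAIM (what is proved, stated in full; the proofs are below) =====
def Claim_equal_dashed : Prop := ∀ (txt : String), Dom_dashed txt → Spec_dashed txt (dashed txt)

-- ===== LEMMAS AND PROOFS =====
theorem dashedGo_eq (l : List Char) (temp : String) :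
    dashedGo l temp =
      temp ++ String.ofList (l.flatMap (fun c => if ("aeiouAEIOU".toList.contains c) then ['-', c, '-'] else [c])) := by
  induction l generalizing temp with
  | nil =>
      apply String.toList_injective
      simp [dashedGo]
  | cons c rest ih =>
      simp only [dashedGo, List.flatMap_cons, ih]
      apply String.toList_injective
      simp only [String.toList_append]
      split <;> simp

-- ===== VERDICT (by name: the statement is the Claim_ definition above) =====
theorem dashed_spec : Claim_equal_dashed := by
  intro txt _
  show dashed txt = dashed_alt txt
  simp [dashed, dashed_alt, dashedGo_eq]
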